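-- pv_equiv track=rewrite | github.com/SSSD/sssd-test-framework | sssd_test_framework/misc/__init__.py | attrs_parse
-- ===== SOURCE A (Python) =====
-- def attrs_parse(lines: list[str], attrs: list[str] | None = None) -> dict[str, list[str]]:
--     """
--     Parse LDAP attributes from output.
--
--     :param lines: Output.
--     :type lines: list[str]
--     :param attrs: If set, only requested attributes are returned, defaults to None
--     :type attrs: list[str] | None, optional
--     :return: Dictionary with attribute name as a key.
--     :rtype: dict[str, list[str]]
--     """
--     out: dict[str, list[str]] = {}
--     i = 0
--     while i < len(lines):
--         line = lines[i].rstrip("\r")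
--         if not line:
--             i += 1
--             continue
--
--         key, value = map(lambda x: x.lstrip(), line.split(":", 1))
--         key = key.strip()
--         while i < len(lines) - 1:
--             if lines[i + 1].startswith(" "):
--                 value += lines[i + 1][1:]
--                 i += 1
--             else:
--                 break
--
--         if attrs is None or key in attrs:
--             out.setdefault(key, [])
--             out[key].append(value)
--         i += 1
--     return out
-- ===== SOURCE B (Python) =====
-- def attrs_parse(lines: list[str], attrs: list[str] | None = None) -> dict[str, list[str]]:
--     """Single forward pass keeping a current (key, value, keep) record instead of an index loop with lookahead."""
--     out: dict[str, list[str]] = {}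
--     cur = None  # (key, value, keep) or None
--
--     def flush():
--         nonlocal cur
--         if cur is not None:
--             key, value, keep = cur
--             if keep:
--                 out.setdefault(key, []).append(value)
--             cur = None
--
--     for raw in lines:
--         if raw.startswith(" ") and cur is not None:
--             key, value, keep = cur
--             cur = (key, value + raw[1:], keep)
--         elif not raw.rstrip("\r"):
--             flush()
--         else:
--             flush()
--             line = raw.rstrip("\r")
--             key, value = map(lambda x: x.lstrip(), line.split(":", 1))
--             key = key.strip()
--             cur = (key, value, attrs is None or key in attrs)
--     flush()
--     return out
-- ===== Notes on version B (the rewrite author's own statement) =====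
-- stated objective: alternative
-- what changed: Replaced A's index-based while loop with an inner lookahead over continuation lines by a single forward pass that carries a current (key, value, keep) record and flushes it on blank lines, new key lines and at the end.
import Mathlib
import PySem

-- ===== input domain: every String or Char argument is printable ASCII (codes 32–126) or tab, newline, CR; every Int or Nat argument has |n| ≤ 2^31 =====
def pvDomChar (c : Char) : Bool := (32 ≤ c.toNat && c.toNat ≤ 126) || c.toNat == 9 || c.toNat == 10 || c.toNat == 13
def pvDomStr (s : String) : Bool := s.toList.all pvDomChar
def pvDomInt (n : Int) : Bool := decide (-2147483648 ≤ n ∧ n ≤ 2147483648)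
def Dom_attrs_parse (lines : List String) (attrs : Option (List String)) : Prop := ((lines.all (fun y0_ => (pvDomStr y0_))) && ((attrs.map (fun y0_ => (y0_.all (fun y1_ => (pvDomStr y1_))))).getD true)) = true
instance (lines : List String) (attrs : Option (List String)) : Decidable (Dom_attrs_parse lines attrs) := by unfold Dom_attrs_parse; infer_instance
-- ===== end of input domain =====

-- B is an alternative decomposition: one forward pass holding a current (key, value, keep) record,
-- instead of A's index-style loop with an inner lookahead over continuation lines. Same O(n) cost.

-- shared helper: s.rstrip("\r") — exact: Python removes only TRAILING '\r' characters here
def pvRstripCR (cs : List Char) : List Char := (cs.reverse.dropWhile (fun c => c == '\r')).reverse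

-- shared helper: 'attrs is None or key in attrs'
def pvKeep (attrsL : Option (List (List Char))) (key : List Char) : Bool :=
  match attrsL with
  | none => true
  | some al => al.contains key

-- ===== PORT A =====
-- inner while: consume following lines that start with ' ', appending line[1:] to value
def pvA_consume (rest : List (List Char)) (value : List Char) : List Char × List (List Char) :=
  match rest with
  | [] => (value, [])
  | l :: ls =>
    if PySem.Chars.startswith l [' '] then pvA_consume ls (value ++ PySem.List.slice l (some 1) none)
    else (value, l :: ls)

theorem pvA_consume_length (rest : List (List Char)) (value : List Char) :
    (pvA_consume rest value).2.length ≤ rest.length := by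
  induction rest generalizing value with
  | nil => simp [pvA_consume]
  | cons l ls ih =>
    simp only [pvA_consume]
    split
    · exact le_trans (ih _) (Nat.le_succ _)
    · simp

def pvA_loop (attrsL : Option (List (List Char))) (rest : List (List Char))
    (out : PySem.Dict (List Char) (List (List Char))) : PySem.Dict (List Char) (List (List Char)) :=
  match rest with
  | [] => out
  | l :: ls =>
    let line := pvRstripCR l
    if line = [] then pvA_loop attrsL ls out
    else
      match PySem.Chars.splitOnMax line [':'] 1 with
      | [k0, v0] =>
        let key := PySem.Chars.strip (PySem.Chars.lstrip k0)
        let value := PySem.Chars.lstrip v0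
        let p := pvA_consume ls value
        -- out.setdefault(key, []); out[key].append(value)  ==  modify key [] (· ++ [value])
        let out' := if pvKeep attrsL key then out.modify key [] (fun vs => vs ++ [p.1]) else out
        pvA_loop attrsL p.2 out'
      | _ => pvA_loop attrsL ls out   -- Python raises ValueError here (no ':'); excluded by Pre_
termination_by rest.length
decreasing_by
  · simp only [List.length_cons]; omega
  · have := pvA_consume_length ls (PySem.Chars.lstrip v0)
    simp only [List.length_cons]; omega
  · simp only [List.length_cons]; omega

def attrs_parse (lines : List String) (attrs : Option (List String)) : List (String × List String) :=
  (pvA_loop (attrs.map (fun l => l.map String.toList)) (lines.map String.toList) PySem.Dict.empty).items.map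
    (fun p => (String.ofList p.1, p.2.map String.ofList))

-- ===== PORT B =====
-- flush(): store the current record if it is active and its keep flag is set
def pvB_flush (out : PySem.Dict (List Char) (List (List Char)))
    (cur : Option (List Char × List Char × Bool)) : PySem.Dict (List Char) (List (List Char)) :=
  match cur with
  | none => out
  | some (key, value, keep) =>
    if keep then out.modify key [] (fun vs => vs ++ [value]) else out

def pvB_step (attrsL : Option (List (List Char)))
    (s : PySem.Dict (List Char) (List (List Char)) × Option (List Char × List Char × Bool))
    (raw : List Char) :
    PySem.Dict (List Char) (List (List Char)) × Option (List Char × List Char × Bool) :=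
  if PySem.Chars.startswith raw [' '] && s.2.isSome then
    match s.2 with
    | some (key, value, keep) => (s.1, some (key, value ++ PySem.List.slice raw (some 1) none, keep))
    | none => s
  else if pvRstripCR raw = [] then (pvB_flush s.1 s.2, none)
  else
    let out := pvB_flush s.1 s.2
    let line := pvRstripCR raw
    match PySem.Chars.splitOnMax line [':'] 1 with
    | [k0, v0] =>
      let key := PySem.Chars.strip (PySem.Chars.lstrip k0)
      let value := PySem.Chars.lstrip v0
      (out, some (key, value, pvKeep attrsL key))
    | _ => (out, none)   -- Python raises ValueError here (no ':'); excluded by Pre_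

def attrs_parse_alt (lines : List String) (attrs : Option (List String)) : List (String × List String) :=
  let attrsL := attrs.map (fun l => l.map String.toList)
  let s := (lines.map String.toList).foldl (pvB_step attrsL) (PySem.Dict.empty, none)
  (pvB_flush s.1 s.2).items.map (fun p => (String.ofList p.1, p.2.map String.ofList))

-- ===== PRECONDITION & SPEC =====
def pvBlankS (s : String) : Bool := pvRstripCR s.toList == []

-- Pre_ excludes exactly the inputs on which A raises ValueError: a line that will be parsed as a
-- key line (non-blank, and either not starting with a space or preceded by nothing/a blank line)
-- but contains no ':'.
def Pre_attrs_parse (lines : List String) (attrs : Option (List String)) : Prop :=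
  ∀ p ∈ List.zip ((none : Option String) :: lines.map some) lines,
    (pvBlankS p.2 = false ∧
      (PySem.Chars.startswith p.2.toList [' '] = false ∨ ((p.1.map pvBlankS).getD true) = true)) →
    ':' ∈ p.2.toList

instance (lines : List String) (attrs : Option (List String)) : Decidable (Pre_attrs_parse lines attrs) := by
  unfold Pre_attrs_parse; infer_instance

def pvWitness_attrs_parse : List String × Option (List String) :=
  (["cn: foo", " bar", "mail: a@b\r", "", " x: 1"], some ["cn", "x"])

def Spec_attrs_parse (lines : List String) (attrs : Option (List String)) (out : List (String × List String)) : Prop := out = attrs_parse_alt lines attrs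
instance (lines : List String) (attrs : Option (List String)) (out : List (String × List String)) : Decidable (Spec_attrs_parse lines attrs out) := by unfold Spec_attrs_parse; infer_instance

-- ===== CLAIM (what is proved, stated in full; the proofs are below) =====
def Claim_equal_attrs_parse : Prop := ∀ (lines : List String) (attrs : Option (List String)), Dom_attrs_parse lines attrs → Pre_attrs_parse lines attrs → Spec_attrs_parse lines attrs (attrs_parse lines attrs)

-- ===== LEMMAS AND PROOFS =====

-- proof-side well-formedness: b = "previous line exists and is non-blank"
def pvOK (b : Bool) : List (List Char) → Prop
  | [] => True
  | l :: ls =>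
    if b && PySem.Chars.startswith l [' '] then pvOK true ls
    else if pvRstripCR l = [] then pvOK false ls
    else ':' ∈ l ∧ pvOK true ls

theorem mem_pvRstripCR {c : Char} {cs : List Char} (h : c ∈ cs) (hne : c ≠ '\r') :
    c ∈ pvRstripCR cs := by
  unfold pvRstripCR
  rw [List.mem_reverse]
  have h' : c ∈ cs.reverse := List.mem_reverse.mpr h
  have hsplit := List.takeWhile_append_dropWhile (p := fun x => x == '\r') (l := cs.reverse)
  rw [← hsplit] at h'
  rcases List.mem_append.mp h' with h1 | h2
  · exact absurd (by simpa using List.mem_takeWhile_imp h1) hne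
  · exact h2

theorem pvRstripCR_ne_nil {c : Char} {cs : List Char} (h : c ∈ cs) (hne : c ≠ '\r') :
    pvRstripCR cs ≠ [] :=
  List.ne_nil_of_mem (mem_pvRstripCR h hne)

theorem pv_go_zero (fuel : Nat) (l cur : List Char) (acc : List (List Char))
    (h : l = [] ∨ 0 < fuel) :
    PySem.Chars.splitOnMax.go [':'] fuel 0 l cur acc = ((cur.reverse ++ l) :: acc).reverse := by
  cases l with
  | nil => cases fuel <;> simp [PySem.Chars.splitOnMax.go]
  | cons c rest =>
    rcases h with h | h
    · simp at h
    · cases fuel with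
      | zero => omega
      | succ f => simp [PySem.Chars.splitOnMax.go]

theorem pv_go_shape (fuel : Nat) (l cur : List Char) (acc : List (List Char))
    (hf : l.length < fuel) (hc : ':' ∈ l) :
    ∃ a b, PySem.Chars.splitOnMax.go [':'] fuel 1 l cur acc = acc.reverse ++ [a, b] := by
  induction fuel generalizing l cur acc with
  | zero => omega
  | succ f ih =>
    cases l with
    | nil => simp at hc
    | cons c rest =>
      by_cases hpre : [':'].isPrefixOf (c :: rest)
      · refine ⟨cur.reverse, rest, ?_⟩
        have hrw : PySem.Chars.splitOnMax.go [':'] (f+1) 1 (c :: rest) cur acc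
            = PySem.Chars.splitOnMax.go [':'] f 0 (List.drop 1 (c :: rest)) [] (cur.reverse :: acc) := by
          simp [PySem.Chars.splitOnMax.go, hpre]
        rw [hrw]
        rw [pv_go_zero]
        · simp
        · simp at hf
          rcases rest with _ | _ <;> simp_all <;> omega
      · have hcr : c ≠ ':' := by
          intro h; apply hpre; simp [h, List.isPrefixOf]
        have hrest : ':' ∈ rest := by
          rcases List.mem_cons.mp hc with h | h
          · exact absurd h.symm hcr
          · exact h
        have hrw : PySem.Chars.splitOnMax.go [':'] (f+1) 1 (c :: rest) cur acc
            = PySem.Chars.splitOnMax.go [':'] f 1 rest (c :: cur) acc := by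
          simp [PySem.Chars.splitOnMax.go, hpre]
        rw [hrw]
        exact ih rest (c :: cur) acc (by simp at hf; omega) hrest

theorem pv_split_shape {cs : List Char} (hc : ':' ∈ cs) :
    ∃ a b, PySem.Chars.splitOnMax cs [':'] 1 = [a, b] := by
  have : ¬ ((1 : Int) < 0) := by norm_num
  obtain ⟨a, b, h⟩ := pv_go_shape (cs.length + 1) cs [] [] (by omega) hc
  exact ⟨a, b, by simpa [PySem.Chars.splitOnMax, this] using h⟩

theorem pv_consume_fold (attrsL : Option (List (List Char))) (ls : List (List Char))
    (out : PySem.Dict (List Char) (List (List Char))) (k v : List Char) (keep : Bool) :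
    List.foldl (pvB_step attrsL) (out, some (k, v, keep)) ls
      = List.foldl (pvB_step attrsL) (out, some (k, (pvA_consume ls v).1, keep)) (pvA_consume ls v).2 := by
  induction ls generalizing v with
  | nil => simp [pvA_consume]
  | cons l ls ih =>
    by_cases hs : PySem.Chars.startswith l [' '] = true
    · have hstep : pvB_step attrsL (out, some (k, v, keep)) l
          = (out, some (k, v ++ PySem.List.slice l (some 1) none, keep)) := by
        simp [pvB_step, hs]
      simp only [List.foldl_cons, hstep, pvA_consume, hs, if_pos]
      exact ih _
    · simp only [pvA_consume, hs, Bool.false_eq_true, if_false]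

theorem pv_consume_ok (ls : List (List Char)) (v : List Char) (h : pvOK true ls) :
    pvOK false (pvA_consume ls v).2 := by
  induction ls generalizing v with
  | nil => simpa [pvA_consume] using h
  | cons l ls ih =>
    by_cases hs : PySem.Chars.startswith l [' '] = true
    · simp only [pvA_consume, hs, if_pos]
      exact ih _ (by simpa [pvOK, hs] using h)
    · simp only [pvA_consume, hs, Bool.false_eq_true, if_false]
      simpa [pvOK, hs] using h

theorem pv_consume_nospace (ls : List (List Char)) (v : List Char) (l' : List Char)
    (ls' : List (List Char)) (h : (pvA_consume ls v).2 = l' :: ls') :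
    PySem.Chars.startswith l' [' '] = false := by
  induction ls generalizing v with
  | nil => simp [pvA_consume] at h
  | cons l ls ih =>
    by_cases hs : PySem.Chars.startswith l [' '] = true
    · simp only [pvA_consume, hs, if_pos] at h
      exact ih _ h
    · simp only [pvA_consume, hs, Bool.false_eq_true, if_false] at h
      cases h
      simp_all

theorem pvB_flush_none (out : PySem.Dict (List Char) (List (List Char))) :
    pvB_flush out none = out := rfl

theorem pv_step_nospace (attrsL : Option (List (List Char)))
    (out : PySem.Dict (List Char) (List (List Char))) (cur : Option (List Char × List Char × Bool))
    (r : List Char) (h : PySem.Chars.startswith r [' '] = false) :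
    pvB_step attrsL (out, cur) r = pvB_step attrsL (pvB_flush out cur, none) r := by
  simp only [pvB_step, h, Bool.false_and, Bool.false_eq_true, if_false, pvB_flush_none]

theorem pv_main (attrsL : Option (List (List Char))) (n : Nat) :
    ∀ (rest : List (List Char)), rest.length ≤ n →
    ∀ (out : PySem.Dict (List Char) (List (List Char))), pvOK false rest →
      pvA_loop attrsL rest out
        = (fun s => pvB_flush s.1 s.2) (List.foldl (pvB_step attrsL) (out, none) rest) := by
  induction n with
  | zero =>
    intro rest hlen out _
    have : rest = [] := List.eq_nil_of_length_eq_zero (Nat.le_zero.mp hlen)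
    subst this
    simp [pvA_loop, pvB_flush]
  | succ n ih =>
    intro rest hlen out hok
    cases rest with
    | nil => simp [pvA_loop, pvB_flush]
    | cons l ls =>
      by_cases hbl : pvRstripCR l = []
      · have hstep : pvB_step attrsL (out, none) l = (out, none) := by
          simp [pvB_step, hbl, pvB_flush]
        have hok' : pvOK false ls := by simpa [pvOK, hbl] using hok
        simp only [pvA_loop, hbl, if_pos, List.foldl_cons, hstep]
        exact ih ls (by simpa using Nat.lt_succ_iff.mp (by simpa using hlen)) out hok'
      · have hok' : (':' ∈ l) ∧ pvOK true ls := by simpa [pvOK, hbl] using hok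
        obtain ⟨hcol, hokt⟩ := hok'
        have hcol' : ':' ∈ pvRstripCR l := mem_pvRstripCR hcol (by decide)
        obtain ⟨a, b, hsplit⟩ := pv_split_shape hcol'
        -- abbreviations
        set key := PySem.Chars.strip (PySem.Chars.lstrip a) with hkey
        set value := PySem.Chars.lstrip b with hvalue
        set kp := pvKeep attrsL key with hkp
        have hstep : pvB_step attrsL (out, none) l = (out, some (key, value, kp)) := by
          simp [pvB_step, hbl, hsplit, pvB_flush]
          exact ⟨rfl, rfl, rfl⟩
        have hA : pvA_loop attrsL (l :: ls) out
            = pvA_loop attrsL (pvA_consume ls value).2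
                (if kp then out.modify key [] (fun vs => vs ++ [(pvA_consume ls value).1]) else out) := by
          rw [pvA_loop]
          simp only [hbl, hsplit, if_false]
          rfl
        have hflush : (if kp then out.modify key [] (fun vs => vs ++ [(pvA_consume ls value).1]) else out)
            = pvB_flush out (some (key, (pvA_consume ls value).1, kp)) := rfl
        rw [hA, hflush]
        rw [List.foldl_cons, hstep, pv_consume_fold]
        have hlen' : (pvA_consume ls value).2.length ≤ n := by
          have := pvA_consume_length ls value
          simp at hlen
          omega
        have hokc := pv_consume_ok ls value hokt
        cases hc : (pvA_consume ls value).2 with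
        | nil => simp [pvA_loop]
        | cons r rs =>
          have hns := pv_consume_nospace ls value r rs hc
          rw [List.foldl_cons, pv_step_nospace attrsL out _ r hns]
          rw [← List.foldl_cons]
          exact ih (r :: rs) (hc ▸ hlen') _ (hc ▸ hokc)

theorem pv_pre_imp_ok (lines : List String) :
    ∀ (prev : Option String),
      (∀ p ∈ List.zip (prev :: lines.map some) lines,
        (pvBlankS p.2 = false ∧
          (PySem.Chars.startswith p.2.toList [' '] = false ∨ ((p.1.map pvBlankS).getD true) = true)) →
        ':' ∈ p.2.toList) →
      pvOK ((prev.map (fun q => !pvBlankS q)).getD false) (lines.map String.toList) := by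
  induction lines with
  | nil => intro prev _; trivial
  | cons l ls ih =>
    intro prev hpre
    have hzip : List.zip (prev :: (l :: ls).map some) (l :: ls)
        = (prev, l) :: List.zip (some l :: ls.map some) ls := by simp [List.zip]
    have hhead := hpre (prev, l) (by rw [hzip]; exact List.mem_cons_self ..)
    have htail : ∀ p ∈ List.zip (some l :: ls.map some) ls,
        (pvBlankS p.2 = false ∧
          (PySem.Chars.startswith p.2.toList [' '] = false ∨ ((p.1.map pvBlankS).getD true) = true)) →
        ':' ∈ p.2.toList := by
      intro p hp
      exact hpre p (by rw [hzip]; exact List.mem_cons_of_mem _ hp)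
    have ihl := ih (some l) htail
    set b := (prev.map (fun q => !pvBlankS q)).getD false with hb
    by_cases hcont : (b && PySem.Chars.startswith l.toList [' ']) = true
    · -- continuation line: previous non-blank, starts with ' '; l itself is non-blank
      have hsp : PySem.Chars.startswith l.toList [' '] = true := by
        rcases Bool.and_eq_true .. |>.mp hcont with ⟨_, h⟩; exact h
      have hmem : ' ' ∈ l.toList := by
        cases hl : l.toList with
        | nil => rw [hl] at hsp; simp [PySem.Chars.startswith] at hsp
        | cons c cs =>
          rw [hl] at hsp
          have hc' : ' ' = c := by simpa [PySem.Chars.startswith, List.isPrefixOf] using hsp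
          rw [← hc']
          simp
      have hnb : pvBlankS l = false := by
        simp only [pvBlankS, beq_eq_false_iff_ne, ne_eq]
        exact pvRstripCR_ne_nil hmem (by decide)
      simp only [List.map_cons, pvOK, hcont, if_pos]
      simpa [hnb] using ihl
    · by_cases hbl : pvRstripCR l.toList = []
      · have hblS : pvBlankS l = true := by simp [pvBlankS, hbl]
        simp only [List.map_cons, pvOK, hcont, hbl, Bool.false_eq_true, if_false, if_pos]
        simpa [hblS] using ihl
      · have hblS : pvBlankS l = false := by simp [pvBlankS, hbl]
        have hcol : ':' ∈ l.toList := by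
          apply hhead
          refine ⟨hblS, ?_⟩
          by_cases hsp : PySem.Chars.startswith l.toList [' '] = false
          · exact Or.inl hsp
          · right
            have hbf : b = false := by
              cases hbb : b
              · rfl
              · exfalso; apply hcont; simp [hbb, eq_true_of_ne_false hsp]
            cases prev with
            | none => simp
            | some q =>
              simp only [hb, Option.map_some, Option.getD_some] at hbf
              have hq : pvBlankS q = true := by simpa using hbf
              simp [hq]
        have hcol' : ':' ∈ (pvRstripCR l.toList) := mem_pvRstripCR hcol (by decide)
        simp only [List.map_cons, pvOK, hcont, hbl, Bool.false_eq_true, if_false]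
        refine ⟨hcol, ?_⟩
        simpa [hblS] using ihl

-- ===== VERDICT (by name: the statement is the Claim_ definition above) =====
theorem attrs_parse_spec : Claim_equal_attrs_parse := by
  intro lines attrs _hdom hpre
  unfold Spec_attrs_parse attrs_parse attrs_parse_alt
  have hok := pv_pre_imp_ok lines none hpre
  simp only [Option.map_none, Option.getD_none] at hok
  rw [pv_main (attrs.map (fun l => l.map String.toList)) (lines.map String.toList).length
      (lines.map String.toList) le_rfl PySem.Dict.empty hok]
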